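-- pv_equiv track=rewrite | github.com/eiriktheyounger/theVault | System/Scripts/inject_recent_context.py | _insert_before_anchors
-- ===== SOURCE A (Python) =====
-- def _insert_before_anchors(existing: str, section: str, anchors: list[str]) -> str:
--     """
--     Insert `section` into `existing` immediately before the earliest of
--     `anchors` (top-of-file-wise). If no anchor found, append to end.
--     """
--     earliest = None
--     for a in anchors:
--         i = existing.find("\n" + a)
--         if i != -1 and (earliest is None or i < earliest):
--             earliest = i
--     if earliest is None:
--         return existing.rstrip() + "\n\n" + section
--     return existing[:earliest].rstrip() + "\n\n" + section + "\n" + existing[earliest + 1:]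
-- ===== SOURCE B (Python) =====
-- def _insert_before_anchors(existing: str, section: str, anchors: list[str]) -> str:
--     # Single left-to-right scan: the first newline followed by any anchor is,
--     # by definition, the earliest anchor position.
--     for i, ch in enumerate(existing):
--         if ch == '\n' and any(existing.startswith(a, i + 1) for a in anchors):
--             return existing[:i].rstrip() + "\n\n" + section + "\n" + existing[i + 1:]
--     return existing.rstrip() + "\n\n" + section
-- ===== Notes on version B (the rewrite author's own statement) =====
-- stated objective: faster
-- what changed: Instead of running a separate full-string find for every anchor and folding the minimum index, B makes one left-to-right scan over the string and returns at the first newline immediately followed by some anchor, which is by definition the earliest anchor position.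
import Mathlib
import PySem

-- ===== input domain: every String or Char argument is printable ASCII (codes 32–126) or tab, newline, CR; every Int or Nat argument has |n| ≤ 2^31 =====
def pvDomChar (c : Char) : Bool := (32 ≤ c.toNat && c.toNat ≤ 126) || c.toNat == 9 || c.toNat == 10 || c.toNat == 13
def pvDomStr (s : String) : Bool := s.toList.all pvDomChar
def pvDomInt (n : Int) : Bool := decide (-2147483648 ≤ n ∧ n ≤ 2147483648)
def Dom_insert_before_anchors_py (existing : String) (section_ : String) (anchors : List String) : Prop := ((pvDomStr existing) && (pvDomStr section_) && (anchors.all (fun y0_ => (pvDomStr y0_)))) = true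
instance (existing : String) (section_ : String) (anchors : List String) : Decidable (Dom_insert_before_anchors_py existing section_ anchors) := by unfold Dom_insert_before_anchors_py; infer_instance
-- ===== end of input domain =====

-- B replaces A's per-anchor find-and-fold-the-minimum with one left-to-right scan that
-- stops at the first newline followed by some anchor (objective: simpler).

-- ===== PORT A =====
-- loop body of A's 'for a in anchors' loop (kept as a named helper)
def pvStepA (e : List Char) (earliest : Option Int) (a : String) : Option Int :=
  let i := PySem.Chars.find e ('\n' :: a.toList)
  if i ≠ -1 then
    match earliest with
    | none => some i
    | some e0 => if i < e0 then some i else earliest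
  else earliest

def insert_before_anchors_py (existing : String) (section_ : String) (anchors : List String) : String :=
  let e := existing.toList
  let earliest : Option Int := anchors.foldl (pvStepA e) none
  match earliest with
  | none => String.ofList (PySem.Chars.rstrip e ++ '\n' :: '\n' :: section_.toList)
  | some k =>
      String.ofList (PySem.Chars.rstrip (PySem.List.slice e none (some k)) ++
        '\n' :: '\n' :: (section_.toList ++ '\n' :: PySem.List.slice e (some (k + 1)) none))

-- ===== PORT B =====
-- B's 'for i, ch in enumerate(existing)' scan: first index i with existing[i] = '\n'
-- and some anchor starting at i+1
def pvScanB (anchors : List String) : Nat → List Char → Option Nat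
  | _, [] => none
  | i, c :: rest =>
      if c = '\n' ∧ anchors.any (fun a => PySem.Chars.startswith rest a.toList) then some i
      else pvScanB anchors (i + 1) rest

def insert_before_anchors_py_alt (existing : String) (section_ : String) (anchors : List String) : String :=
  let e := existing.toList
  match pvScanB anchors 0 e with
  | some i =>
      String.ofList (PySem.Chars.rstrip (e.take i) ++
        '\n' :: '\n' :: (section_.toList ++ '\n' :: e.drop (i + 1)))
  | none => String.ofList (PySem.Chars.rstrip e ++ '\n' :: '\n' :: section_.toList)

-- ===== PRECONDITION & SPEC =====
def Spec_insert_before_anchors_py (existing : String) (section_ : String) (anchors : List String) (out : String) : Prop := out = insert_before_anchors_py_alt existing section_ anchors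
instance (existing : String) (section_ : String) (anchors : List String) (out : String) : Decidable (Spec_insert_before_anchors_py existing section_ anchors out) := by unfold Spec_insert_before_anchors_py; infer_instance

-- ===== CLAIM (what is proved, stated in full; the proofs are below) =====
def Claim_equal_insert_before_anchors_py : Prop := ∀ (existing : String) (section_ : String) (anchors : List String), Dom_insert_before_anchors_py existing section_ anchors → Spec_insert_before_anchors_py existing section_ anchors (insert_before_anchors_py existing section_ anchors)

-- ===== LEMMAS AND PROOFS =====

-- "some anchor occurs right after a newline at position j of l"
def pvHit (anchors : List String) (l : List Char) (j : Nat) : Prop :=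
  ∃ a ∈ anchors, ('\n' :: a.toList) <+: l.drop j

lemma pvScanB_none (anchors : List String) :
    ∀ (l : List Char) (i : Nat), pvScanB anchors i l = none → ∀ j, ¬ pvHit anchors l j := by
  intro l
  induction l with
  | nil =>
      intro i _ j h
      rcases h with ⟨a, _, hp⟩
      simp [List.drop_nil] at hp
  | cons c rest ih =>
      intro i hscan j h
      by_cases hc : c = '\n' ∧ anchors.any (fun a => PySem.Chars.startswith rest a.toList)
      · simp [pvScanB, hc] at hscan
      · simp only [pvScanB, if_neg hc] at hscan
        cases j with
        | zero =>
            rcases h with ⟨a, ha, hp⟩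
            simp only [List.drop_zero] at hp
            rcases List.cons_prefix_cons.mp hp with ⟨hc1, hp1⟩
            exact hc ⟨hc1.symm, List.any_eq_true.mpr ⟨a, ha, (PySem.Chars.startswith_iff rest a.toList).mpr hp1⟩⟩
        | succ j' =>
            exact ih (i + 1) hscan j' (by rcases h with ⟨a, ha, hp⟩; exact ⟨a, ha, by simpa using hp⟩)

lemma pvScanB_some (anchors : List String) :
    ∀ (l : List Char) (i k : Nat), pvScanB anchors i l = some k →
      i ≤ k ∧ pvHit anchors l (k - i) ∧ ∀ j < k - i, ¬ pvHit anchors l j := by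
  intro l
  induction l with
  | nil => intro i k h; simp [pvScanB] at h
  | cons c rest ih =>
      intro i k hscan
      by_cases hc : c = '\n' ∧ anchors.any (fun a => PySem.Chars.startswith rest a.toList)
      · simp only [pvScanB, if_pos hc] at hscan
        obtain rfl : i = k := by simpa using hscan
        refine ⟨le_rfl, ?_, by omega⟩
        rcases List.any_eq_true.mp hc.2 with ⟨a, ha, hsw⟩
        exact ⟨a, ha, by
          simp only [Nat.sub_self, List.drop_zero]
          exact List.cons_prefix_cons.mpr ⟨hc.1.symm, (PySem.Chars.startswith_iff rest a.toList).mp hsw⟩⟩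
      · simp only [pvScanB, if_neg hc] at hscan
        obtain ⟨hik, hhit, hmin⟩ := ih (i + 1) k hscan
        refine ⟨by omega, ?_, ?_⟩
        · rcases hhit with ⟨a, ha, hp⟩
          refine ⟨a, ha, ?_⟩
          have : (c :: rest).drop (k - i) = rest.drop (k - (i + 1)) := by
            have : k - i = (k - (i + 1)) + 1 := by omega
            simp [this]
          rw [this]; exact hp
        · intro j hj h
          cases j with
          | zero =>
              rcases h with ⟨a, ha, hp⟩
              simp only [List.drop_zero] at hp
              rcases List.cons_prefix_cons.mp hp with ⟨hc1, hp1⟩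
              exact hc ⟨hc1.symm, List.any_eq_true.mpr ⟨a, ha, (PySem.Chars.startswith_iff rest a.toList).mpr hp1⟩⟩
          | succ j' =>
              refine hmin j' (by omega) ?_
              rcases h with ⟨a, ha, hp⟩
              exact ⟨a, ha, by simpa using hp⟩

lemma pvFoldA_none (e : List Char) :
    ∀ (l : List String) (s : Option Int), l.foldl (pvStepA e) s = none ↔
      s = none ∧ ∀ a ∈ l, PySem.Chars.find e ('\n' :: a.toList) = -1 := by
  intro l
  induction l with
  | nil => intro s; simp
  | cons a l ih =>
      intro s
      simp only [List.foldl_cons, ih, List.mem_cons]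
      constructor
      · rintro ⟨hstep, hall⟩
        unfold pvStepA at hstep
        by_cases hi : PySem.Chars.find e ('\n' :: a.toList) = -1
        · simp only [hi, ne_eq, not_true_eq_false, ite_false] at hstep
          refine ⟨by simpa [hi] using hstep, ?_⟩
          rintro b (rfl | hb)
          · exact hi
          · exact hall b hb
        · exfalso
          simp only [ne_eq, hi, not_false_eq_true, if_pos] at hstep
          cases s <;> simp at hstep
          split at hstep <;> simp_all
      · rintro ⟨rfl, hall⟩
        have hi := hall a (Or.inl rfl)
        refine ⟨?_, fun b hb => hall b (Or.inr hb)⟩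
        unfold pvStepA
        simp [hi]

lemma pvStepA_none_imp (e : List Char) (s : Option Int) (a : String) :
    pvStepA e s a = none → s = none := by
  unfold pvStepA
  intro h
  by_cases hi : PySem.Chars.find e ('\n' :: a.toList) = -1
  · simpa [hi] using h
  · exfalso
    simp only [ne_eq, hi, not_false_eq_true, if_pos] at h
    cases s <;> simp at h
    split at h <;> simp_all

lemma pvStepA_isSome (e : List Char) (s : Option Int) (a : String)
    (h : PySem.Chars.find e ('\n' :: a.toList) ≠ -1) : (pvStepA e s a).isSome := by
  have hsome : ∀ s', pvStepA e s' a ≠ none := by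
    intro s' hc
    have hs := pvStepA_none_imp e s' a hc
    subst hs
    unfold pvStepA at hc
    simp [h] at hc
  cases hms : pvStepA e s a with
  | none => exact absurd hms (hsome s)
  | some m0 => simp

lemma pvFoldA_some (e : List Char) :
    ∀ (l : List String) (s : Option Int) (k : Int), l.foldl (pvStepA e) s = some k →
      (s = some k ∨ (∃ a ∈ l, PySem.Chars.find e ('\n' :: a.toList) = k ∧ k ≠ -1))
      ∧ (∀ m, s = some m → k ≤ m)
      ∧ (∀ a ∈ l, PySem.Chars.find e ('\n' :: a.toList) ≠ -1 → k ≤ PySem.Chars.find e ('\n' :: a.toList)) := by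
  intro l
  induction l with
  | nil =>
      intro s k h
      simp only [List.foldl_nil] at h
      exact ⟨Or.inl h, fun m hm => by simp [h] at hm; omega, by simp⟩
  | cons a l ih =>
      intro s k h
      simp only [List.foldl_cons] at h
      obtain ⟨hsrc, hsb, hbnd⟩ := ih (pvStepA e s a) k h
      have hstep : ∀ m, pvStepA e s a = some m →
          (s = some m ∨ (PySem.Chars.find e ('\n' :: a.toList) = m ∧ m ≠ -1))
          ∧ (∀ m', s = some m' → m ≤ m')
          ∧ (PySem.Chars.find e ('\n' :: a.toList) ≠ -1 → m ≤ PySem.Chars.find e ('\n' :: a.toList)) := by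
        intro m hm
        unfold pvStepA at hm
        by_cases hi : PySem.Chars.find e ('\n' :: a.toList) = -1
        · simp only [hi, ne_eq, not_true_eq_false, ite_false] at hm
          exact ⟨Or.inl hm, fun m' hm' => by rw [hm] at hm'; simp at hm'; omega, fun h' => absurd hi h'⟩
        · simp only [ne_eq, hi, not_false_eq_true, if_pos] at hm
          cases s with
          | none => simp at hm; exact ⟨Or.inr ⟨hm, by omega⟩, by simp, by omega⟩
          | some e0 =>
              by_cases hlt : PySem.Chars.find e ('\n' :: a.toList) < e0
              · simp only [if_pos hlt] at hm
                simp at hm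
                refine ⟨Or.inr ⟨hm, by omega⟩, ?_, by omega⟩
                intro m' hm'; simp at hm'; omega
              · simp only [if_neg hlt] at hm
                simp at hm
                refine ⟨Or.inl (by rw [hm]), fun m' hm' => by simp [hm] at hm'; omega, by omega⟩
      constructor
      · rcases hsrc with hks | ⟨b, hb, hfb⟩
        · rcases (hstep k hks).1 with h1 | h2
          · exact Or.inl h1
          · exact Or.inr ⟨a, List.mem_cons_self .., h2⟩
        · exact Or.inr ⟨b, List.mem_cons_of_mem _ hb, hfb⟩
      constructor
      · intro m hm
        rcases hsrc with hks | ⟨b, hb, hfb⟩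
        · exact (hstep k hks).2.1 m hm
        · -- k comes from later anchors; bound via the step output
          cases hms : pvStepA e s a with
          | none =>
              rw [pvStepA_none_imp e s a hms] at hm
              simp at hm
          | some m0 =>
              have h1 := hsb m0 (by rw [hms])
              have h2 := (hstep m0 hms).2.1 m hm
              omega
      · rintro b hb hfb
        rcases List.mem_cons.mp hb with hba | hbl
        · rw [hba] at hfb ⊢
          cases hms : pvStepA e s a with
          | none => exact absurd (pvStepA_isSome e s a hfb) (by simp [hms])
          | some m0 =>
              have h1 := hsb m0 (by rw [hms])
              have h2 := (hstep m0 hms).2.2 hfb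
              omega
        · exact hbnd b hbl hfb

lemma pvHit_find_le (anchors : List String) (e : List Char) (j : Nat) (h : pvHit anchors e j) :
    ∃ a ∈ anchors, 0 ≤ PySem.Chars.find e ('\n' :: a.toList) ∧
      (PySem.Chars.find e ('\n' :: a.toList)).toNat ≤ j := by
  rcases h with ⟨a, ha, hp⟩
  have hfind : 0 ≤ PySem.Chars.find e ('\n' :: a.toList) := by
    rw [PySem.Chars.find_nonneg_iff]
    rw [← PySem.Chars.isIn_iff_infix, ← PySem.Chars.exists_prefix_drop_iff_isIn]
    exact ⟨j, hp⟩
  refine ⟨a, ha, hfind, ?_⟩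
  by_contra hlt
  exact (PySem.Chars.find_spec hfind).2 j (by omega) hp

-- ===== VERDICT (by name: the statement is the Claim_ definition above) =====
theorem insert_before_anchors_py_spec : Claim_equal_insert_before_anchors_py := by
  intro existing section_ anchors _
  unfold Spec_insert_before_anchors_py insert_before_anchors_py insert_before_anchors_py_alt
  set e := existing.toList with he
  cases hfold : anchors.foldl (pvStepA e) none with
  | none =>
      -- no anchor occurs: B's scan finds nothing either
      have hallneg := ((pvFoldA_none e anchors none).mp hfold).2
      cases hscan : pvScanB anchors 0 e with
      | none => simp [hfold, hscan]
      | some m =>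
          exfalso
          obtain ⟨_, hhit, _⟩ := pvScanB_some anchors e 0 m hscan
          obtain ⟨a, ha, hnn, _⟩ := pvHit_find_le anchors e _ hhit
          have := hallneg a ha
          omega
  | some k =>
      obtain ⟨hsrc, _, hbnd⟩ := pvFoldA_some e anchors none k hfold
      rcases hsrc with h | ⟨a, ha, hfa, hk⟩
      · simp at h
      have hk0 : 0 ≤ k := by
        have := PySem.Chars.neg_one_le_find e ('\n' :: a.toList)
        omega
      -- k.toNat is a hit
      have hhitk : pvHit anchors e k.toNat := by
        refine ⟨a, ha, ?_⟩
        have := (PySem.Chars.find_spec (by rw [hfa]; exact hk0)).1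
        rwa [hfa] at this
      -- and nothing below k.toNat is a hit
      have hminhit : ∀ j < k.toNat, ¬ pvHit anchors e j := by
        intro j hj h
        obtain ⟨b, hb, hnn, hle⟩ := pvHit_find_le anchors e j h
        have := hbnd b hb (by omega)
        omega
      cases hscan : pvScanB anchors 0 e with
      | none => exact absurd hhitk (pvScanB_none anchors e 0 hscan k.toNat)
      | some m =>
          obtain ⟨_, hhitm, hminm⟩ := pvScanB_some anchors e 0 m hscan
          simp only [Nat.sub_zero] at hhitm hminm
          have hmk : m = k.toNat := by
            rcases Nat.lt_trichotomy m k.toNat with h | h | h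
            · exact absurd hhitm (hminhit m h)
            · exact h
            · exact absurd hhitk (hminm k.toNat h)
          subst hmk
          simp only [hfold, hscan]
          rw [PySem.List.slice_to e hk0, PySem.List.slice_from e (by omega : (0:Int) ≤ k + 1)]
          have : (k + 1).toNat = k.toNat + 1 := by omega
          rw [this]
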